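-- pv_equiv track=rewrite | github.com/EleutherAI/semantic-memorization | filters/highly_repetitive.py | find_smallest_repeating_unit
-- ===== SOURCE A (Python) =====
-- from typing import List, Tuple, Union
--
-- def find_smallest_repeating_unit(lst) -> List:
--     """
--     This function takes a list as input and returns the smallest repeating unit of the list. If no such unit exists, it returns the list itself.
--
--     Args:
--         lst (List): The input list.
--
--     Returns:
--         List: The smallest repeating unit of the list. If no such unit exists, it returns the list itself.
--     """
--     if lst is None:
--         return []
--     n = len(lst)
--
--     # Try all possible lengths of repeating units
--     for unit_length in range(1, n // 2 + 1):
--         # Check if the list can be divided into repeating units of the current length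
--         if n % unit_length == 0:
--             unit = lst[:unit_length]  # Extract a potential repeating unit
--
--             # Check if the entire list can be formed by repeating the unit
--             if all(lst[i : i + unit_length] == unit for i in range(0, n, unit_length)):
--                 return unit, n // unit_length
--
--     # If no repeating unit is found, the list itself is the smallest repeating unit
--     return lst, 1
-- ===== SOURCE B (Python) =====
-- def find_smallest_repeating_unit(lst):
--     """Self-overlap formulation: lst is made of repeats of its length-d prefix
--     iff d divides n and lst shifted by d coincides with its first n-d elements."""
--     if lst is None:
--         return []
--     n = len(lst)
--     d = next((d for d in range(1, n // 2 + 1)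
--               if n % d == 0 and lst[d:] == lst[:n - d]), None)
--     return (lst, 1) if d is None else (lst[:d], n // d)
-- ===== Notes on version B (the rewrite author's own statement) =====
-- stated objective: alternative
-- what changed: The per-chunk scan (compare every length-d block against the prefix) is replaced by a single self-overlap test lst[d:] == lst[:n-d] per divisor, selected with next() over a generator.
import Mathlib
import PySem

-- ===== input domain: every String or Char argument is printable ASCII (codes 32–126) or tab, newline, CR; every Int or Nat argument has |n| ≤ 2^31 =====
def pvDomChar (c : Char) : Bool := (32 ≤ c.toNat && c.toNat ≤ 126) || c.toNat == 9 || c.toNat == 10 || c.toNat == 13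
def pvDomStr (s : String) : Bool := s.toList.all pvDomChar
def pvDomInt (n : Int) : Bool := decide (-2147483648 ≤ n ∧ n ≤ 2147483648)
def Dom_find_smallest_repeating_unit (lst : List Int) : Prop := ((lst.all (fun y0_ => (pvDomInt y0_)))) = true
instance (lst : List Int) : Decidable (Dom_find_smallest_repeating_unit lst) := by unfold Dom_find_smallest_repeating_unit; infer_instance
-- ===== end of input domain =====

-- B replaces A's per-chunk scan by a single self-overlap test lst[d:] == lst[:n-d] per divisor (alternative algorithm, same cost class).
-- ===== PORT A =====
-- all(lst[i : i + unit_length] == unit for i in range(0, n, unit_length))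
def pvAChunksOK (lst unit : List Int) (n d : Int) : Bool :=
  (PySem.List.pyRange 0 n d).all
    (fun i => PySem.List.slice lst (some i) (some (i + d)) == unit)

-- the 'for unit_length in range(1, n // 2 + 1)' loop with its early returns
def pvALoop (lst : List Int) (n : Int) : List Int → List Int × Int
  | [] => (lst, 1)
  | d :: rest =>
    if PySem.Int.mod n d == 0 then
      let unit := PySem.List.slice lst none (some d)
      if pvAChunksOK lst unit n d then (unit, PySem.Int.floordiv n d)
      else pvALoop lst n rest
    else pvALoop lst n rest

def find_smallest_repeating_unit (lst : List Int) : List Int × Int :=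
  let n : Int := (lst.length : Int)
  pvALoop lst n (PySem.List.pyRange 1 (PySem.Int.floordiv n 2 + 1) 1)

-- ===== PORT B =====
-- n % d == 0 and lst[d:] == lst[:n - d]
def pvBIsPeriod (lst : List Int) (n d : Int) : Bool :=
  PySem.Int.mod n d == 0 &&
    (PySem.List.slice lst (some d) none == PySem.List.slice lst none (some (n - d)))

def find_smallest_repeating_unit_alt (lst : List Int) : List Int × Int :=
  let n : Int := (lst.length : Int)
  match (PySem.List.pyRange 1 (PySem.Int.floordiv n 2 + 1) 1).find? (fun d => pvBIsPeriod lst n d) with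
  | none => (lst, 1)
  | some d => (PySem.List.slice lst none (some d), PySem.Int.floordiv n d)

-- ===== PRECONDITION & SPEC =====
def Spec_find_smallest_repeating_unit (lst : List Int) (out : List Int × Int) : Prop := out = find_smallest_repeating_unit_alt lst
instance (lst : List Int) (out : List Int × Int) : Decidable (Spec_find_smallest_repeating_unit lst out) := by unfold Spec_find_smallest_repeating_unit; infer_instance

-- ===== CLAIM (what is proved, stated in full; the proofs are below) =====
def Claim_equal_find_smallest_repeating_unit : Prop := ∀ (lst : List Int), Dom_find_smallest_repeating_unit lst → Spec_find_smallest_repeating_unit lst (find_smallest_repeating_unit lst)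

-- ===== LEMMAS AND PROOFS =====

-- one chunk comparison lst[q*k : q*k+k] == lst[:k], elementwise
theorem pv_chunk_iff_elem (l : List Int) (k q : Nat) (hk : 0 < k)
    (hq : q * k + k ≤ l.length) :
    ((l.drop (q * k)).take k = l.take k
      ↔ ∀ r, (hr : r < k) → l[q * k + r]'(by omega) = l[r]'(by omega)) := by
  constructor
  · intro h r hr
    have h1 : ((l.drop (q * k)).take k)[r]? = ((l.take k))[r]? := by rw [h]
    rw [List.getElem?_take, List.getElem?_take, List.getElem?_drop] at h1
    simp only [if_pos hr] at h1
    rw [List.getElem?_eq_getElem (by omega), List.getElem?_eq_getElem (by omega)] at h1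
    exact Option.some.inj h1
  · intro h
    apply List.ext_getElem
    · simp; omega
    · intro i h1 h2
      have hi : i < k := by simp at h2; omega
      simp only [List.getElem_take, List.getElem_drop]
      exact h i hi

-- the self-overlap test lst[k:] == lst[:n-k], elementwise
theorem pv_shift_iff_elem (l : List Int) (k : Nat) (hkle : k ≤ l.length) :
    (l.drop k = l.take (l.length - k)
      ↔ ∀ i, (hi : k + i < l.length) → l[k + i]'(by omega) = l[i]'(by omega)) := by
  constructor
  · intro h i hi
    have h1 : (l.drop k)[i]? = (l.take (l.length - k))[i]? := by rw [h]
    rw [List.getElem?_take, List.getElem?_drop] at h1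
    simp only [if_pos (show i < l.length - k by omega)] at h1
    rw [List.getElem?_eq_getElem (by omega), List.getElem?_eq_getElem (by omega)] at h1
    exact Option.some.inj h1
  · intro h
    apply List.ext_getElem
    · simp
    · intro i h1 h2
      have hi : k + i < l.length := by simp at h1; omega
      simp only [List.getElem_take, List.getElem_drop]
      exact h i hi

-- a divisibility step: any chunk start below the length leaves room for a whole chunk
theorem pv_step (l : List Int) (k m : Nat) (hk : 0 < k) (hm : l.length = m * k) :
    ∀ q : Nat, q * k < l.length → q * k + k ≤ l.length := by
  intro q hq
  have h1 : q * k < m * k := by omega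
  have h2 : q < m := Nat.lt_of_mul_lt_mul_right h1
  have h4 : (q + 1) * k ≤ m * k := Nat.mul_le_mul_right k h2
  have h5 : (q + 1) * k = q * k + k := by ring
  omega

-- shift property propagates to every chunk (induction on the chunk index)
theorem pv_elem_up (l : List Int) (k : Nat) (hk : 0 < k)
    (hs : ∀ i, (hi : k + i < l.length) → l[k + i]'(by omega) = l[i]'(by omega)) :
    ∀ q r, (h1 : q * k + k ≤ l.length) → (hr : r < k) →
      l[q * k + r]'(by omega) = l[r]'(by omega) := by
  intro q
  induction q with
  | zero => intro r h1 hr; simp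
  | succ p ih =>
    intro r h1 hr
    have e : (p + 1) * k = p * k + k := by ring
    have ha : (p + 1) * k + r = k + (p * k + r) := by omega
    have hlt : k + (p * k + r) < l.length := by omega
    have h3 := hs (p * k + r) hlt
    have h4 := ih r (by omega) hr
    calc l[(p + 1) * k + r]'(by omega) = l[k + (p * k + r)]'(by omega) := by simp only [ha]
      _ = l[p * k + r]'(by omega) := h3
      _ = l[r]'(by omega) := h4

-- chunk property gives the shift property (decompose the index by the divisor)
theorem pv_elem_down (l : List Int) (k m : Nat) (hk : 0 < k) (hm : l.length = m * k)
    (hc : ∀ q r, (h1 : q * k + k ≤ l.length) → (hr : r < k) →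
      l[q * k + r]'(by omega) = l[r]'(by omega)) :
    ∀ i, (hi : k + i < l.length) → l[k + i]'(by omega) = l[i]'(by omega) := by
  intro i hi
  have hdm := Nat.div_add_mod i k
  have hrk : i % k < k := Nat.mod_lt _ hk
  have e1 : i / k * k = k * (i / k) := Nat.mul_comm _ _
  have e4 : i / k * k + i % k = i := by omega
  have hq1 : i / k * k + k ≤ l.length := by omega
  have h1 := hc (i / k) (i % k) hq1 hrk
  have e2 : (i / k + 1) * k = i / k * k + k := by ring
  have hlt2 : (i / k + 1) * k < l.length := by omega
  have hq2 := pv_step l k m hk hm (i / k + 1) hlt2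
  have h2 := hc (i / k + 1) (i % k) hq2 hrk
  have e3 : (i / k + 1) * k + i % k = k + i := by omega
  calc l[k + i]'(by omega) = l[(i / k + 1) * k + i % k]'(by omega) := by simp only [e3]
    _ = l[i % k]'(by omega) := h2
    _ = l[i / k * k + i % k]'(by omega) := h1.symm
    _ = l[i]'(by omega) := by simp only [e4]

-- core periodicity equivalence: all chunks equal the prefix iff the list self-overlaps at k
theorem pv_core (l : List Int) (k m : Nat) (hk : 0 < k) (hm : l.length = m * k)
    (hkle : k ≤ l.length) :
    ((∀ q : Nat, q * k < l.length → (l.drop (q * k)).take k = l.take k)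
      ↔ l.drop k = l.take (l.length - k)) := by
  constructor
  · intro h
    rw [pv_shift_iff_elem l k hkle]
    exact pv_elem_down l k m hk hm (fun q r h1 h2 =>
      (pv_chunk_iff_elem l k q hk h1).1 (h q (by omega)) r h2)
  · intro h q hq
    rw [pv_chunk_iff_elem l k q hk (pv_step l k m hk hm q hq)]
    intro r hr
    exact pv_elem_up l k hk ((pv_shift_iff_elem l k hkle).1 h) q r (pv_step l k m hk hm q hq) hr

-- per candidate length: A's divisor-and-chunks condition equals B's divisor-and-overlap condition
theorem pv_cond_eq (l : List Int) (d : Int) (hd1 : 1 ≤ d)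
    (hd2 : d ≤ PySem.Int.floordiv (l.length : Int) 2) :
    ((PySem.Int.mod (l.length : Int) d == 0)
        && pvAChunksOK l (PySem.List.slice l none (some d)) (l.length : Int) d)
      = pvBIsPeriod l (l.length : Int) d := by
  set len := l.length with hlen
  have hk : d = ((d.toNat : Nat) : Int) := by omega
  set k := d.toNat with hkdef
  have hkpos : 0 < k := by omega
  have hfd : PySem.Int.floordiv (len : Int) 2 = ((len / 2 : Nat) : Int) := by
    exact_mod_cast PySem.Int.floordiv_natCast len 2
  have hk2 : 2 * k ≤ len := by
    rw [hfd] at hd2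
    omega
  have hkle : k ≤ len := by omega
  rw [hk]
  by_cases hdvd : k ∣ len
  · obtain ⟨m, hmm⟩ := hdvd
    have hm : len = m * k := by rw [hmm, Nat.mul_comm]
    have hmod : PySem.Int.mod (len : Int) ((k : Nat) : Int) = 0 := by
      rw [PySem.Int.mod_natCast, Nat.mod_eq_zero_of_dvd ⟨m, hmm⟩]
      simp
    simp only [pvBIsPeriod, hmod]
    simp only [beq_self_eq_true, Bool.true_and]
    have hsl1 : PySem.List.slice l none (some ((k : Nat) : Int)) = l.take k :=
      PySem.List.slice_to_natCast l k
    have hsl2 : PySem.List.slice l (some ((k : Nat) : Int)) none = l.drop k :=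
      PySem.List.slice_from_natCast l k
    have hsl3 : PySem.List.slice l none (some ((len : Int) - ((k : Nat) : Int))) = l.take (len - k) := by
      have he : (len : Int) - ((k : Nat) : Int) = ((len - k : Nat) : Int) := by omega
      rw [he]
      exact PySem.List.slice_to_natCast l (len - k)
    rw [hsl1, hsl2, hsl3, Bool.eq_iff_iff]
    simp only [pvAChunksOK, List.all_eq_true, beq_iff_eq]
    rw [← pv_core l k m hkpos hm hkle]
    constructor
    · intro h q hq
      have hq' : ((q * k : Nat) : Int) < (len : Int) := by exact_mod_cast hq
      have hmem : ((q * k : Nat) : Int) ∈ PySem.List.pyRange 0 (len : Int) ((k : Nat) : Int) := by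
        rw [PySem.List.mem_pyRange_iff_of_pos (show (0 : Int) < ((k : Nat) : Int) by omega)]
        refine ⟨by positivity, hq', ⟨(q : Int), by push_cast; ring⟩⟩
      have h2 := h _ hmem
      rw [PySem.List.slice_natCast_add l (q * k) k] at h2
      exact h2
    · intro h i hmem
      rw [PySem.List.mem_pyRange_iff_of_pos (show (0 : Int) < ((k : Nat) : Int) by omega)] at hmem
      obtain ⟨hi0, hilen, c, hc⟩ := hmem
      rw [sub_zero] at hc
      have hc0 : 0 ≤ c := by nlinarith
      have hieq : i = ((c.toNat * k : Nat) : Int) := by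
        push_cast
        rw [Int.toNat_of_nonneg hc0, hc]
        ring
      have hqlt : c.toNat * k < len := by
        have h5 : ((c.toNat * k : Nat) : Int) < (len : Int) := by rw [← hieq]; exact hilen
        exact_mod_cast h5
      have h2 := h c.toNat hqlt
      rw [hieq, PySem.List.slice_natCast_add l (c.toNat * k) k]
      exact h2
  · have hmod : (PySem.Int.mod (len : Int) ((k : Nat) : Int) == 0) = false := by
      rw [PySem.Int.mod_natCast]
      simp only [beq_eq_false_iff_ne, ne_eq]
      intro hc
      exact hdvd (Nat.dvd_of_mod_eq_zero (by exact_mod_cast hc))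
    simp only [pvBIsPeriod, hmod, Bool.false_and]

-- A's loop is find? on B's predicate over the same candidate list
theorem pv_loop_eq (l : List Int) (n : Int) (cands : List Int)
    (h : ∀ d ∈ cands,
      ((PySem.Int.mod n d == 0) && pvAChunksOK l (PySem.List.slice l none (some d)) n d)
        = pvBIsPeriod l n d) :
    pvALoop l n cands
      = match cands.find? (fun d => pvBIsPeriod l n d) with
        | none => (l, 1)
        | some d => (PySem.List.slice l none (some d), PySem.Int.floordiv n d) := by
  induction cands with
  | nil => simp [pvALoop]
  | cons d rest ih =>
    have hd := h d (by simp)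
    cases hb : pvBIsPeriod l n d with
    | true =>
      rw [hb] at hd
      have hmod : (PySem.Int.mod n d == 0) = true := by
        cases hmm : (PySem.Int.mod n d == 0) <;> simp [hmm] at hd ⊢
      have hch : pvAChunksOK l (PySem.List.slice l none (some d)) n d = true := by
        rw [hmod] at hd
        simpa using hd
      simp [pvALoop, hmod, hch, hb]
    | false =>
      rw [hb] at hd
      have hrec : pvALoop l n (d :: rest) = pvALoop l n rest := by
        cases hmm : (PySem.Int.mod n d == 0) with
        | false => simp [pvALoop, hmm]
        | true =>
          have hch : pvAChunksOK l (PySem.List.slice l none (some d)) n d = false := by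
            rw [hmm] at hd
            simpa using hd
          simp [pvALoop, hmm, hch]
      rw [hrec, ih (fun d' hm => h d' (List.mem_cons_of_mem d hm))]
      simp [List.find?_cons, hb]

-- ===== VERDICT (by name: the statement is the Claim_ definition above) =====
theorem find_smallest_repeating_unit_spec : Claim_equal_find_smallest_repeating_unit := by
  intro lst _
  show find_smallest_repeating_unit lst = find_smallest_repeating_unit_alt lst
  simp only [find_smallest_repeating_unit, find_smallest_repeating_unit_alt]
  apply pv_loop_eq
  intro d hd
  rw [PySem.List.mem_pyRange_one] at hd
  exact pv_cond_eq lst d hd.1 (by omega)
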